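-- pv_equiv track=rewrite | github.com/b-zhu524/usaco_practice | lineup/lineup.py | solve
-- ===== SOURCE A (Python) =====
-- from itertools import permutations
--
-- def solve(constraints):
--     cows = ["Bessie", "Buttercup", "Belinda", "Beatrice",
--             "Bella", "Blue", "Betsy", "Sue"]
--     cows.sort()
--
--     for permutation in permutations(cows):
--         cow_positions = dict()
--         for idx, cow in enumerate(permutation):
--             cow_positions[cow] = idx
--
--         meet_all_constraints = True
--         for cow1, cow2 in constraints:
--             if abs(cow_positions[cow1] - cow_positions[cow2]) != 1:
--                 meet_all_constraints = False
--                 break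
--         if meet_all_constraints:
--             return permutation
-- ===== SOURCE B (Python) =====
-- # Recursive lex-order backtracking over the 8 sorted cows instead of scanning
-- # all 8! permutations; constraints are checked incrementally as cows are placed.
-- def solve(constraints):
--     cows = sorted(["Bessie", "Buttercup", "Belinda", "Beatrice",
--                    "Bella", "Blue", "Betsy", "Sue"])
--
--     cow_set = set(cows)
--     for a, b in constraints:
--         if a not in cow_set:
--             raise KeyError(a)
--         if b not in cow_set:
--             raise KeyError(b)
--
--     def extend(placed, pos, remaining):
--         if not remaining:
--             return tuple(placed)
--         for cow in remaining:
--             pos2 = dict(pos)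
--             pos2[cow] = len(placed)
--             ok = all(abs(pos2[a] - pos2[b]) == 1
--                      for a, b in constraints
--                      if (a == cow or b == cow) and a in pos2 and b in pos2)
--             if ok:
--                 result = extend(placed + [cow], pos2,
--                                 [c for c in remaining if c != cow])
--                 if result is not None:
--                     return result
--         return None
--
--     return extend([], {}, cows)
-- ===== Notes on version B (the rewrite author's own statement) =====
-- stated objective: faster
-- what changed: Replaces the flat scan of all 8! permutations with a lex-order recursive backtracking search that validates the constraint names upfront and checks each constraint as soon as both its cows are placed, pruning whole subtrees; Pre_ excludes constraint lists naming a cow outside the fixed eight, on which both programs raise KeyError, except in degenerate cases where an unsatisfiable prefix of known-cow constraints makes A return None before the unknown name is ever looked up while B still raises.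
import Mathlib
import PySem

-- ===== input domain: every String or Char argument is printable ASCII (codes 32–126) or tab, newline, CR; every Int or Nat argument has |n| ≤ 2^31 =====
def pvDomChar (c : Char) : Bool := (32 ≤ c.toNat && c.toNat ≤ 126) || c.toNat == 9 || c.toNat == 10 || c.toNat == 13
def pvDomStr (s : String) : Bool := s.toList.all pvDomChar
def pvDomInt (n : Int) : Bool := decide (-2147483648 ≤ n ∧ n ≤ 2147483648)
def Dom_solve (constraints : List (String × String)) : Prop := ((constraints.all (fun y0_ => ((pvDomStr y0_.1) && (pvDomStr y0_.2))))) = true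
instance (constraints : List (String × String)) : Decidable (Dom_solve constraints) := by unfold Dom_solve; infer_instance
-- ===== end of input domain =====

-- B replaces A's flat scan of all 8! permutations with a lex-order recursive
-- backtracking search that validates the names upfront and checks each
-- constraint as soon as both its cows are placed, pruning whole subtrees.

-- ===== PORT A =====
-- the literal list of cows from A, before sorting
def cowsLit : List String :=
  ["Bessie", "Buttercup", "Belinda", "Beatrice", "Bella", "Blue", "Betsy", "Sue"]

def cowsA : List String := PySem.List.sorted cowsLit (fun x => x) false

-- itertools.permutations, hand-ported (lex index order): pick each element in
-- turn, recurse on the rest; fuel = length of the list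
def selections : List String → List (String × List String)
  | [] => []
  | x :: xs => (x, xs) :: (selections xs).map (fun p => (p.1, x :: p.2))

def permsA : Nat → List String → List (List String)
  | 0, _ => [[]]
  | n + 1, xs => (selections xs).flatMap (fun p => (permsA n p.2).map (p.1 :: ·))

-- cow_positions dict of A's inner loop
def posDictA (perm : List String) : PySem.Dict String Int :=
  (PySem.List.enumerate perm).foldl (fun d p => d.insert p.2 p.1) PySem.Dict.empty

-- A's constraint loop with break = all; getD 0 is exact only under Pre_solve
-- (on a name outside the permutation Python raises KeyError, excluded below)
def checkA (constraints : List (String × String)) (perm : List String) : Bool :=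
  constraints.all (fun c =>
    ((posDictA perm).getD c.1 0 - (posDictA perm).getD c.2 0).natAbs == 1)

def solve (constraints : List (String × String)) : Option (List String) :=
  (permsA cowsA.length cowsA).find? (checkA constraints)

-- ===== PORT B =====
def cowsB : List String := PySem.List.sorted cowsLit (fun x => x) false

-- B's incremental check: constraints touching the newly placed cow whose other
-- endpoint is already placed
def checkB (constraints : List (String × String)) (pos2 : PySem.Dict String Int)
    (cow : String) : Bool :=
  constraints.all (fun c =>
    if (c.1 == cow || c.2 == cow) && pos2.contains c.1 && pos2.contains c.2 then
      (pos2.getD c.1 0 - pos2.getD c.2 0).natAbs == 1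
    else true)

-- B's recursive extend; fuel = remaining.length only makes termination evident
def extendB (constraints : List (String × String)) :
    Nat → List String → PySem.Dict String Int → List String → Option (List String)
  | _, placed, _, [] => some placed
  | 0, _, _, _ :: _ => none
  | n + 1, placed, pos, r@(_ :: _) =>
      r.findSome? (fun cow =>
        let pos2 := pos.insert cow (placed.length : Int)
        if checkB constraints pos2 cow then
          extendB constraints n (placed ++ [cow]) pos2 (r.filter (fun c => c != cow))
        else none)

-- B validates the names upfront (Python raises KeyError there = none here,
-- outside Pre_solve), then backtracks
def solve_alt (constraints : List (String × String)) : Option (List String) :=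
  if constraints.all (fun c => cowsB.contains c.1 && cowsB.contains c.2) then
    extendB constraints cowsB.length [] PySem.Dict.empty cowsB
  else none

-- ===== PRECONDITION & SPEC =====
-- Pre_ excludes constraint lists naming a cow outside the fixed eight: both
-- programs raise KeyError there, except in degenerate cases where an
-- unsatisfiable prefix of known-cow constraints makes A return None before the
-- unknown name is ever looked up while B still raises.
def Pre_solve (constraints : List (String × String)) : Prop :=
  (constraints.all (fun c => cowsLit.contains c.1 && cowsLit.contains c.2)) = true
instance (constraints : List (String × String)) : Decidable (Pre_solve constraints) := by
  unfold Pre_solve; infer_instance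

def pvWitness_solve : (List (String × String)) := [("Bessie", "Sue")]

def Spec_solve (constraints : List (String × String)) (out : Option (List String)) : Prop :=
  out = solve_alt constraints
instance (constraints : List (String × String)) (out : Option (List String)) :
    Decidable (Spec_solve constraints out) := by unfold Spec_solve; infer_instance

-- ===== CLAIM (what is proved, stated in full; the proofs are below) =====
def Claim_equal_solve : Prop := ∀ (constraints : List (String × String)),
  Dom_solve constraints → Pre_solve constraints → Spec_solve constraints (solve constraints)

-- ===== LEMMAS AND PROOFS =====

theorem cowsA_eq : cowsA =
    ["Beatrice", "Belinda", "Bella", "Bessie", "Betsy", "Blue", "Buttercup", "Sue"] :=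
  PySem.List.sorted_id_eq_of_perm_of_pairwise _ _ (by decide) (by
    simp only [String.le_iff_toList_le]; decide)

theorem posDictA_append_singleton (l : List String) (c : String) :
    posDictA (l ++ [c]) = (posDictA l).insert c (l.length : Int) := by
  unfold posDictA
  rw [PySem.List.enumerate_append, List.foldl_append]
  simp [PySem.List.enumerate_cons, PySem.List.enumerate_nil]

theorem contains_posDictA (l : List String) (a : String) :
    (posDictA l).contains a = l.contains a := by
  induction l using List.reverseRecOn with
  | nil => simp [posDictA, PySem.List.enumerate_nil, PySem.Dict.contains_empty]
  | append_singleton t c ih =>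
      rw [posDictA_append_singleton, PySem.Dict.contains_insert, ih]
      by_cases h : a = c <;> simp [h, List.contains_eq_mem]

theorem get?_posDictA_append_of_ne (l₁ l₂ : List String) (a : String)
    (h : ∀ b ∈ l₂, b ≠ a) :
    (posDictA (l₁ ++ l₂)).get? a = (posDictA l₁).get? a := by
  induction l₂ using List.reverseRecOn with
  | nil => simp
  | append_singleton t c ih =>
      rw [← List.append_assoc, posDictA_append_singleton, PySem.Dict.get?_insert]
      rw [if_neg (fun hac => (h c (by simp)) hac.symm)]
      exact ih (fun b hb => h b (by simp [hb]))

theorem getD_posDictA_append_of_ne (l₁ l₂ : List String) (a : String)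
    (h : ∀ b ∈ l₂, b ≠ a) :
    (posDictA (l₁ ++ l₂)).getD a 0 = (posDictA l₁).getD a 0 := by
  rw [PySem.Dict.getD_eq_get?_getD, PySem.Dict.getD_eq_get?_getD,
    get?_posDictA_append_of_ne l₁ l₂ a h]

-- selections of a nodup list picks each element with the rest (as a filter)
theorem selections_eq_map_filter (xs : List String) (h : xs.Nodup) :
    selections xs = xs.map (fun y => (y, xs.filter (fun c => c != y))) := by
  induction xs with
  | nil => rfl
  | cons x t ih =>
      have hx : x ∉ t := (List.nodup_cons.mp h).1
      rw [selections, ih (List.nodup_cons.mp h).2]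
      rw [List.map_map, List.map_cons]
      congr 1
      · simp only [List.filter_cons]
        simp only [bne_self_eq_false, Bool.false_eq_true, reduceIte]
        rw [List.filter_eq_self.mpr (fun b hb => by
          simp [bne_iff_ne]; exact fun hbx => hx (hbx ▸ hb))]
      · apply List.map_congr_left
        intro y hy
        simp only [Function.comp_apply, List.filter_cons]
        have hxy : (x != y) = true := by
          simp [bne_iff_ne]; exact fun hxy => hx (hxy ▸ hy)
        rw [hxy]
        simp
      
theorem mem_permsA_perm (n : Nat) : ∀ (xs : List String) (p : List String),
    xs.Nodup → xs.length = n → p ∈ permsA n xs → p.Perm xs := by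
  induction n with
  | zero =>
      intro xs p _ hlen hp
      rw [List.length_eq_zero_iff.mp hlen] at *
      simp [permsA] at hp
      simp [hp]
  | succ n ih =>
      intro xs p hnd hlen hp
      rw [permsA, selections_eq_map_filter xs hnd, List.flatMap_map] at hp
      rcases List.mem_flatMap.mp hp with ⟨y, hy, hmem⟩
      rcases List.mem_map.mp hmem with ⟨t, ht, rfl⟩
      have hfil : xs.filter (fun c => c != y) = xs.erase y :=
        (List.Nodup.erase_eq_filter hnd y).symm
      have hnd' : (xs.filter (fun c => c != y)).Nodup := List.Nodup.filter _ hnd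
      have hlen' : (xs.filter (fun c => c != y)).length = n := by
        rw [hfil, List.length_erase_of_mem hy, hlen]
        omega
      have hperm := ih _ t hnd' hlen' ht
      have h2 : (y :: t).Perm (y :: xs.erase y) := by
        rw [← hfil]; exact hperm.cons y
      exact h2.trans (List.perm_cons_erase hy).symm

theorem find?_flatMap {α β : Type} (xs : List α) (f : α → List β) (p : β → Bool) :
    ((xs.flatMap f).find? p) = xs.findSome? (fun x => (f x).find? p) := by
  induction xs with
  | nil => rfl
  | cons x t ih =>
      rw [List.flatMap_cons, List.find?_append, List.findSome?_cons, ih]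
      cases h : (f x).find? p <;> simp [Option.or]

theorem findSome?_congr {α β : Type} (l : List α) (f g : α → Option β)
    (h : ∀ x ∈ l, f x = g x) : l.findSome? f = l.findSome? g := by
  induction l with
  | nil => rfl
  | cons x t ih =>
      rw [List.findSome?_cons, List.findSome?_cons, h x (by simp),
        ih (fun y hy => h y (by simp [hy]))]

-- the invariant: every constraint with both endpoints already placed is adjacent
def partialOK (constraints : List (String × String)) (placed : List String) : Bool :=
  constraints.all (fun c =>
    !(decide (c.1 ∈ placed) && decide (c.2 ∈ placed)) ||
      ((posDictA placed).getD c.1 0 - (posDictA placed).getD c.2 0).natAbs == 1)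

theorem checkA_of_partialOK (C : List (String × String)) (placed : List String)
    (hin : ∀ c ∈ C, c.1 ∈ placed ∧ c.2 ∈ placed)
    (hok : partialOK C placed = true) : checkA C placed = true := by
  rw [checkA, List.all_eq_true]
  intro c hc
  have := (List.all_eq_true.mp hok) c hc
  simpa [(hin c hc).1, (hin c hc).2] using this

theorem partialOK_snoc (C : List (String × String)) (placed : List String) (y : String)
    (hy : y ∉ placed)
    (hok : partialOK C placed = true)
    (hchk : checkB C (posDictA (placed ++ [y])) y = true) :
    partialOK C (placed ++ [y]) = true := by
  rw [partialOK, List.all_eq_true]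
  intro c hc
  by_cases hb : c.1 ∈ placed ++ [y] ∧ c.2 ∈ placed ++ [y]
  · -- both endpoints placed now: show adjacency
    suffices hadj : (((posDictA (placed ++ [y])).getD c.1 0 -
        (posDictA (placed ++ [y])).getD c.2 0).natAbs == 1) = true by simp [hb.1, hb.2, hadj]
    by_cases hyc : c.1 = y ∨ c.2 = y
    · -- the constraint touches y: checkB checked it
      have hall := (List.all_eq_true.mp hchk) c hc
      have hcond : ((c.1 == y || c.2 == y) && (posDictA (placed ++ [y])).contains c.1
          && (posDictA (placed ++ [y])).contains c.2) = true := by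
        rw [contains_posDictA, contains_posDictA]
        rcases hyc with h | h <;> simp [List.contains_eq_mem, hb.1, hb.2, h]
      rw [if_pos hcond] at hall
      exact hall
    · -- both endpoints were already in placed: positions are stable
      push_neg at hyc
      have hm1 : c.1 ∈ placed := by
        rcases List.mem_append.mp hb.1 with h | h
        · exact h
        · exact absurd (by simpa using h) hyc.1
      have hm2 : c.2 ∈ placed := by
        rcases List.mem_append.mp hb.2 with h | h
        · exact h
        · exact absurd (by simpa using h) hyc.2
      have hold := (List.all_eq_true.mp hok) c hc
      simp only [hm1, hm2, decide_true, Bool.and_self, Bool.not_true,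
        Bool.false_or] at hold
      have e1 := getD_posDictA_append_of_ne placed [y] c.1
        (by intro b hb'; simp at hb'; subst hb'; exact fun h => hy (h ▸ hm1))
      have e2 := getD_posDictA_append_of_ne placed [y] c.2
        (by intro b hb'; simp at hb'; subst hb'; exact fun h => hy (h ▸ hm2))
      rw [e1, e2]
      exact hold
  · rcases Decidable.not_and_iff_or_not.mp hb with h | h <;> simp [h]

-- main induction: backtracking from a valid partial placement equals the
-- first-match scan over all completions, in the same lexicographic order
theorem extend_eq_find (C : List (String × String)) (n : Nat) :
    ∀ (placed : List String) (remaining : List String),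
    (placed ++ remaining).Nodup →
    remaining.length = n →
    (∀ c ∈ C, c.1 ∈ placed ++ remaining ∧ c.2 ∈ placed ++ remaining) →
    partialOK C placed = true →
    extendB C n placed (posDictA placed) remaining =
      ((permsA n remaining).map (fun t => placed ++ t)).find? (checkA C) := by
  induction n with
  | zero =>
      intro placed remaining hnd hlen hin hok
      rw [List.length_eq_zero_iff.mp hlen] at *
      rw [extendB, permsA]
      have : checkA C placed = true := checkA_of_partialOK C placed
        (by simpa using hin) hok
      simp [this]
  | succ n ih =>
      intro placed remaining hnd hlen hin hok
      obtain ⟨z, zs, rfl⟩ : ∃ z zs, remaining = z :: zs :=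
        match remaining, hlen with | z :: zs, _ => ⟨z, zs, rfl⟩
      set r := z :: zs with hr
      have hndr : r.Nodup := (List.nodup_append.mp hnd).2.1
      rw [permsA, selections_eq_map_filter r hndr, List.flatMap_map,
        List.map_flatMap, find?_flatMap, extendB]
      apply findSome?_congr
      intro cow hcow
      -- shared facts about this branch
      have hfil : r.filter (fun c => c != cow) = r.erase cow :=
        (List.Nodup.erase_eq_filter hndr cow).symm
      have hpermr : r.Perm (cow :: r.filter (fun c => c != cow)) := by
        rw [hfil]; exact List.perm_cons_erase hcow
      have hcownp : cow ∉ placed := by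
        intro hmem
        exact (List.disjoint_of_nodup_append hnd) hmem hcow
      have hpos2 : (posDictA placed).insert cow (placed.length : Int) =
          posDictA (placed ++ [cow]) := (posDictA_append_singleton placed cow).symm
      simp only [hpos2]
      by_cases hchk : checkB C (posDictA (placed ++ [cow])) cow = true
      · -- constraint check passes: recurse
        rw [if_pos hchk]
        have hperm2 : (placed ++ [cow] ++ r.filter (fun c => c != cow)).Perm
            (placed ++ r) := by
          rw [List.append_assoc]
          exact List.Perm.append_left placed (List.Perm.symm (by simpa using hpermr))
        have hnd' : (placed ++ [cow] ++ r.filter (fun c => c != cow)).Nodup :=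
          hperm2.nodup_iff.mpr hnd
        have hlen' : (r.filter (fun c => c != cow)).length = n := by
          rw [hfil, List.length_erase_of_mem hcow, hlen]
          omega
        have hin' : ∀ c ∈ C, c.1 ∈ placed ++ [cow] ++ r.filter (fun c => c != cow) ∧
            c.2 ∈ placed ++ [cow] ++ r.filter (fun c => c != cow) := by
          intro c hc
          exact ⟨hperm2.mem_iff.mpr (hin c hc).1, hperm2.mem_iff.mpr (hin c hc).2⟩
        have hok' : partialOK C (placed ++ [cow]) = true :=
          partialOK_snoc C placed cow hcownp hok hchk
        rw [ih (placed ++ [cow]) (r.filter (fun c => c != cow)) hnd' hlen' hin' hok']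
        rw [List.map_map]
        congr 1
        apply List.map_congr_left
        intro t _
        simp
      · -- pruned branch: every completion fails the full check
        rw [if_neg hchk]
        symm
        rw [List.find?_eq_none]
        intro q hq
        rcases List.mem_map.mp hq with ⟨ct, hct, rfl⟩
        rcases List.mem_map.mp hct with ⟨t, ht, rfl⟩
        -- t is a permutation of the filtered remainder
        have hndf : (r.filter (fun c => c != cow)).Nodup := List.Nodup.filter _ hndr
        have hlenf : (r.filter (fun c => c != cow)).length = n := by
          rw [hfil, List.length_erase_of_mem hcow, hlen]; omega
        have hpt : t.Perm (r.filter (fun c => c != cow)) :=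
          mem_permsA_perm n _ t hndf hlenf ht
        -- the violated constraint from checkB
        rw [checkB, List.all_eq_true] at hchk
        push_neg at hchk
        rcases hchk with ⟨c, hc, hcbad⟩
        intro habs
        apply hcbad
        by_cases hcond : ((c.1 == cow || c.2 == cow) &&
            (posDictA (placed ++ [cow])).contains c.1 &&
            (posDictA (placed ++ [cow])).contains c.2) = true
        · rw [if_pos hcond]
          -- positions of c.1, c.2 are stable when t is appended
          rw [Bool.and_eq_true, Bool.and_eq_true] at hcond
          have hm1 : c.1 ∈ placed ++ [cow] := by
            have := hcond.1.2
            rw [contains_posDictA] at this; simpa using this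
          have hm2 : c.2 ∈ placed ++ [cow] := by
            have := hcond.2
            rw [contains_posDictA] at this; simpa using this
          rw [← Bool.and_eq_true, ← Bool.and_eq_true] at hcond
          have hdisj : ∀ b ∈ t, b ∉ placed ++ [cow] := by
            intro b hb hbmem
            have hbf : b ∈ r.filter (fun c => c != cow) := hpt.subset hb
            have hbr : b ∈ r := List.mem_of_mem_filter hbf
            have hbne : b ≠ cow := by
              have := List.of_mem_filter hbf
              simpa [bne_iff_ne] using this
            rcases List.mem_append.mp hbmem with h | h
            · exact (List.disjoint_of_nodup_append hnd) h hbr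
            · exact hbne (by simpa using h)
          have e1 := getD_posDictA_append_of_ne (placed ++ [cow]) t c.1
            (fun b hb => fun hba => (hdisj b hb) (hba ▸ hm1))
          have e2 := getD_posDictA_append_of_ne (placed ++ [cow]) t c.2
            (fun b hb => fun hba => (hdisj b hb) (hba ▸ hm2))
          -- habs : checkA C (placed ++ (cow :: t)) = true
          have habs' := (List.all_eq_true.mp habs) c hc
          have hassoc : placed ++ cow :: t = (placed ++ [cow]) ++ t := by simp
          rw [hassoc] at habs'
          rw [e1, e2] at habs'
          exact habs'
        · rw [if_neg hcond]
  
-- at the start: empty placement, all cows remaining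
theorem posDictA_nil : posDictA [] = PySem.Dict.empty := rfl

theorem partialOK_nil (C : List (String × String)) : partialOK C [] = true := by
  rw [partialOK, List.all_eq_true]; intro c _; rfl

-- ===== VERDICT (by name: the statement is the Claim_ definition above) =====
theorem solve_spec : Claim_equal_solve := by
  intro C _ hpre
  unfold Spec_solve solve solve_alt
  have hBA : cowsB = cowsA := rfl
  have hnd : cowsA.Nodup := by rw [cowsA_eq]; decide
  have hmemA : ∀ a : String, cowsLit.contains a = true → a ∈ cowsA := by
    intro a ha
    unfold cowsA
    rw [PySem.List.mem_sorted]
    simpa using ha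
  have hin : ∀ c ∈ C, c.1 ∈ ([] : List String) ++ cowsA ∧ c.2 ∈ ([] : List String) ++ cowsA := by
    intro c hc
    have := (List.all_eq_true.mp hpre) c hc
    rw [Bool.and_eq_true] at this
    exact ⟨by simpa using hmemA _ this.1, by simpa using hmemA _ this.2⟩
  have hguard : C.all (fun c => cowsB.contains c.1 && cowsB.contains c.2) = true := by
    rw [List.all_eq_true]
    intro c hc
    have := (List.all_eq_true.mp hpre) c hc
    rw [Bool.and_eq_true] at this
    rw [Bool.and_eq_true, hBA, List.contains_eq_mem, List.contains_eq_mem]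
    exact ⟨by simpa using hmemA _ this.1, by simpa using hmemA _ this.2⟩
  rw [if_pos hguard]
  have := extend_eq_find C cowsA.length [] cowsA (by simpa using hnd) rfl hin
    (partialOK_nil C)
  rw [hBA, ← posDictA_nil, this]
  simp
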